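-- pv_equiv track=rewrite | github.com/ra397/small-dams-drainage-boundaries | find_descendants.py | get_all_descendants
-- ===== SOURCE A (Python) =====
-- from collections import deque
--
-- def get_all_descendants(lookup, start_id):
--     visited = set()
--     queue = deque([start_id])
--     while queue:
--         node = queue.popleft()
--         if node in visited:
--             continue
--         visited.add(node)
--         children = lookup.get(node)
--         if children:
--             queue.extend(children)
--     return visited
-- ===== SOURCE B (Python) =====
-- def get_all_descendants(lookup, start_id):
--     # Level-synchronized expansion in staged passes: each round builds the whole
--     # candidate list of the current generation, dedups it, filters out known
--     # nodes and bulk-updates the visited set -- no queue, no per-node bookkeeping.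
--     visited = {start_id}
--     frontier = [start_id]
--     while frontier:
--         candidates = [child for node in frontier for child in lookup.get(node) or []]
--         frontier = [c for c in dict.fromkeys(candidates) if c not in visited]
--         visited.update(frontier)
--     return visited
-- ===== Notes on version B (the rewrite author's own statement) =====
-- stated objective: alternative
-- what changed: B replaces A's FIFO deque worklist with skip-on-dequeue by a staged level-by-level fixpoint: each round a comprehension gathers all children of the current generation, dict.fromkeys dedups them, known nodes are filtered out and the visited set is bulk-updated, so there is no queue and no per-node visited check at dequeue.
import Mathlib
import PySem

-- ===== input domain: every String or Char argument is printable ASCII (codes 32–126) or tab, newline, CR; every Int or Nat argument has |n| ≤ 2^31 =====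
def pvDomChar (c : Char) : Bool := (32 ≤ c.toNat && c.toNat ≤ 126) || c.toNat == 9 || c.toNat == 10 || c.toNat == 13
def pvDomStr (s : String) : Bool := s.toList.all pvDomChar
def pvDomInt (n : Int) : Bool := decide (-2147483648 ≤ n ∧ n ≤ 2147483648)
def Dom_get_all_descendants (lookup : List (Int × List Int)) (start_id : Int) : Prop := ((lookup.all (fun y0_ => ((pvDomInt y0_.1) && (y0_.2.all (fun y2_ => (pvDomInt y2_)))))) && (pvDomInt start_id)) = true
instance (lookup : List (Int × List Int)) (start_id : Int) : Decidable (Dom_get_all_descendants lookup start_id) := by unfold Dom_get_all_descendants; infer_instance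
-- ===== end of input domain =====

-- B expands the reachable set level by level in staged passes (gather all children of the
-- current generation, dedup, filter, bulk-update) instead of A's FIFO-deque worklist with
-- a skip-on-dequeue visited check; same return value.

-- Shared termination machinery for the worklist/level loops.
-- pvUniv: every key and every child occurring in the lookup; pvChildSum: total number of child entries.
def pvUniv (lookup : List (Int × List Int)) : List Int :=
  lookup.map Prod.fst ++ lookup.flatMap Prod.snd

def pvChildSum (lookup : List (Int × List Int)) : Nat :=
  (lookup.flatMap Prod.snd).length

def pvMu (lookup : List (Int × List Int)) (v : PySem.Set Int) (q : List Int) : Nat :=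
  (pvUniv lookup).countP (fun y => decide (y ∉ v)) * (pvChildSum lookup + 1) + q.length

lemma pvIf_le (v w : List Int) (h : ∀ y : Int, y ∈ v → y ∈ w) (a : Int) :
    (if decide (a ∉ w) = true then 1 else 0)
      ≤ (if decide (a ∉ v) = true then (1 : Nat) else 0) := by
  by_cases hv : a ∈ v
  · simp [hv, h a hv]
  · by_cases hw : a ∈ w <;> simp [hv, hw]

lemma pvCountP_mono (l : List Int) (v w : List Int)
    (h : ∀ y : Int, y ∈ v → y ∈ w) :
    l.countP (fun y => decide (y ∉ w)) ≤ l.countP (fun y => decide (y ∉ v)) := by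
  induction l with
  | nil => simp
  | cons a l ih =>
    simp only [List.countP_cons]
    have hb := pvIf_le v w h a
    omega

lemma pvCountP_strict (l : List Int) (v w : List Int)
    (h : ∀ y : Int, y ∈ v → y ∈ w) (x : Int)
    (hx : x ∈ l) (hxw : x ∈ w) (hxv : x ∉ v) :
    l.countP (fun y => decide (y ∉ w)) < l.countP (fun y => decide (y ∉ v)) := by
  induction l with
  | nil => simp at hx
  | cons a l ih =>
    simp only [List.countP_cons]
    have hmono := pvCountP_mono l v w h
    have hb := pvIf_le v w h a
    rcases List.mem_cons.1 hx with rfl | hx'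
    · have e1 : (if decide (x ∉ w) = true then (1 : Nat) else 0) = 0 := by simp [hxw]
      have e2 : (if decide (x ∉ v) = true then (1 : Nat) else 0) = 1 := by simp [hxv]
      omega
    · have := ih hx'
      omega

lemma pvGet?_mem (lookup : List (Int × List Int)) (n : Int) (cs : List Int)
    (h : (PySem.Dict.mk lookup).get? n = some cs) : (n, cs) ∈ lookup := by
  induction lookup with
  | nil => simp [PySem.Dict.get?] at h
  | cons p rest ih =>
    rw [PySem.Dict.get?_mk_cons] at h
    by_cases hk : p.1 == n
    · simp [hk] at h
      have : p.1 = n := by simpa using hk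
      cases p
      simp_all
    · simp [hk] at h
      exact List.mem_cons_of_mem _ (ih h)

lemma pvEntry_child_mem (lookup : List (Int × List Int)) (n : Int) (cs : List Int)
    (h : (n, cs) ∈ lookup) : ∀ c ∈ cs, c ∈ pvUniv lookup := by
  intro c hc
  exact List.mem_append_right _ (List.mem_flatMap.2 ⟨(n, cs), h, hc⟩)

lemma pvEntry_key_mem (lookup : List (Int × List Int)) (n : Int) (cs : List Int)
    (h : (n, cs) ∈ lookup) : n ∈ pvUniv lookup :=
  List.mem_append_left _ (List.mem_map.2 ⟨(n, cs), h, rfl⟩)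

lemma pvEntry_len_le (lookup : List (Int × List Int)) (n : Int) (cs : List Int)
    (h : (n, cs) ∈ lookup) : cs.length ≤ pvChildSum lookup := by
  induction lookup with
  | nil => simp at h
  | cons p rest ih =>
    rcases List.mem_cons.1 h with rfl | h'
    · simp [pvChildSum, List.flatMap_cons]
    · have := ih h'
      simp only [pvChildSum, List.flatMap_cons, List.length_append] at *
      omega

-- ===== PORT A =====
-- BFS worklist loop of A: the queue may hold duplicates/visited nodes, filtered at dequeue.
def pvBfsA (lookup : List (Int × List Int)) (visited : PySem.Set Int) (queue : List Int) :
    PySem.Set Int :=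
  match queue with
  | [] => visited
  | node :: rest =>
    if hnv : node ∈ visited then
      pvBfsA lookup visited rest
    else
      -- children = lookup.get(node); 'if children:' treats None and [] alike (both falsy),
      -- so the two falsy cases are merged through getD [].
      if hcs : ((PySem.Dict.mk lookup).get? node).getD [] = [] then
        pvBfsA lookup (PySem.Set.add visited node) rest
      else
        pvBfsA lookup (PySem.Set.add visited node)
          (rest ++ ((PySem.Dict.mk lookup).get? node).getD [])
termination_by pvMu lookup visited queue
decreasing_by
  · simp [pvMu]
  · -- new node, falsy children: nothing enqueued
    have hmono := pvCountP_mono (pvUniv lookup) visited (PySem.Set.add visited node)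
      (by intro y hy; simp [PySem.Set.mem_add, hy])
    simp only [pvMu, List.length_cons]
    have hmul := Nat.mul_le_mul_right (pvChildSum lookup + 1) hmono
    omega
  · -- new node with a nonempty children list
    rcases hget : (PySem.Dict.mk lookup).get? node with _ | cs
    · exact absurd (by simp [hget]) hcs
    · simp only [hget, Option.getD_some] at hcs ⊢
      have hmemL : (node, cs) ∈ lookup := pvGet?_mem _ _ _ hget
      have hstrict := pvCountP_strict (pvUniv lookup) visited (PySem.Set.add visited node)
        (by intro y hy; simp [PySem.Set.mem_add, hy]) node
        (pvEntry_key_mem _ _ _ hmemL) (by simp [PySem.Set.mem_add]) hnv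
      have hlen : cs.length ≤ pvChildSum lookup := pvEntry_len_le _ _ _ hmemL
      simp only [pvMu, List.length_append, List.length_cons]
      have hmul := Nat.mul_le_mul_right (pvChildSum lookup + 1) hstrict
      rw [Nat.succ_mul] at hmul
      omega

def get_all_descendants (lookup : List (Int × List Int)) (start_id : Int) : List Int :=
  pvBfsA lookup PySem.Set.empty [start_id]

-- ===== PORT B =====
-- Level loop of B: while the frontier is nonempty, gather every child of the whole
-- generation (the comprehension), dedup with dict.fromkeys, drop already-known nodes,
-- bulk-update visited, and recurse on the new generation.
def pvLevelB (lookup : List (Int × List Int)) (visited : PySem.Set Int) (frontier : List Int) :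
    PySem.Set Int :=
  if hf : frontier = [] then visited
  else
    let cands := frontier.flatMap (fun n => ((PySem.Dict.mk lookup).get? n).getD [])
    let next := (PySem.List.dedup cands).filter (fun c => !(PySem.Set.contains visited c))
    pvLevelB lookup (PySem.Set.update visited next) next
termination_by ((pvUniv lookup).countP (fun y => decide (y ∉ visited)), frontier.length)
decreasing_by
  have hattach : List.flatMap (fun x : {x // x ∈ frontier} => ((PySem.Dict.mk lookup).get? x.1).getD []) frontier.attach
      = frontier.flatMap (fun n => ((PySem.Dict.mk lookup).get? n).getD []) := by simp
  simp only [hattach]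
  rcases hnx : (PySem.List.dedup (frontier.flatMap (fun n => ((PySem.Dict.mk lookup).get? n).getD []))).filter
      (fun c => !(PySem.Set.contains visited c)) with _ | ⟨c0, nrest⟩
  · -- nothing new this round: visited unchanged, the frontier shrinks to []
    have hupd : PySem.Set.update visited ([] : List Int) = visited := rfl
    rw [hupd]
    apply Prod.Lex.right
    simpa using List.length_pos_iff.2 hf
  · -- at least one genuinely new node c0 in the next generation
    have hc0 : c0 ∈ (PySem.List.dedup (frontier.flatMap (fun n => ((PySem.Dict.mk lookup).get? n).getD []))).filter
        (fun c => !(PySem.Set.contains visited c)) := by rw [hnx]; exact List.mem_cons_self ..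
    rw [List.mem_filter] at hc0
    obtain ⟨hmemd, hnotv⟩ := hc0
    rw [PySem.List.mem_dedup, List.mem_flatMap] at hmemd
    obtain ⟨n, -, hcn⟩ := hmemd
    have hnv : c0 ∉ visited := by
      intro h
      have := (PySem.Set.contains_iff visited c0).2 h
      simp [PySem.Set.contains] at this
      simp [PySem.Set.contains, this] at hnotv
    have huniv : c0 ∈ pvUniv lookup := by
      rcases hget : (PySem.Dict.mk lookup).get? n with _ | cs
      · rw [hget] at hcn; simp at hcn
      · rw [hget, Option.getD_some] at hcn
        exact pvEntry_child_mem _ _ _ (pvGet?_mem _ _ _ hget) c0 hcn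
    apply Prod.Lex.left
    exact pvCountP_strict (pvUniv lookup) visited _
      (fun y hy => (PySem.Set.mem_update visited _ y).2 (Or.inl hy)) c0 huniv
      ((PySem.Set.mem_update visited _ c0).2 (Or.inr (List.mem_cons_self ..))) hnv

def get_all_descendants_alt (lookup : List (Int × List Int)) (start_id : Int) : List Int :=
  pvLevelB lookup (PySem.Set.ofList [start_id]) [start_id]

-- ===== PRECONDITION & SPEC =====
def Spec_get_all_descendants (lookup : List (Int × List Int)) (start_id : Int) (out : List Int) : Prop := out = get_all_descendants_alt lookup start_id
instance (lookup : List (Int × List Int)) (start_id : Int) (out : List Int) : Decidable (Spec_get_all_descendants lookup start_id out) := by unfold Spec_get_all_descendants; infer_instance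

-- ===== CLAIM (what is proved, stated in full; the proofs are below) =====
def Claim_equal_get_all_descendants : Prop := ∀ (lookup : List (Int × List Int)) (start_id : Int), Dom_get_all_descendants lookup start_id → Spec_get_all_descendants lookup start_id (get_all_descendants lookup start_id)

-- ===== LEMMAS AND PROOFS =====

-- Proof-side intermediate: a dedup-at-enqueue BFS worklist, used only as a stepping stone
-- between A's filter-at-dequeue queue and B's staged level loop.
def pvStep (st : PySem.Set Int × List Int) (c : Int) : PySem.Set Int × List Int :=
  if c ∈ st.1 then st else (PySem.Set.add st.1 c, st.2 ++ [c])

-- pvPend v q: the first occurrences in q of nodes not in v.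
def pvPend (v : PySem.Set Int) : List Int → List Int
  | [] => []
  | n :: rest => if n ∈ v then pvPend v rest else n :: pvPend (v ++ [n]) rest

lemma pvFoldEq (cs : List Int) (v p : List Int) :
    cs.foldl pvStep (v, p) = (v ++ pvPend v cs, p ++ pvPend v cs) := by
  induction cs generalizing v p with
  | nil => simp [pvPend]
  | cons c cs ih =>
    simp only [List.foldl_cons, pvPend, pvStep]
    by_cases hc : c ∈ v
    · rw [if_pos hc, if_pos hc, ih]
    · rw [if_neg hc, if_neg hc]
      have : PySem.Set.add v c = v ++ [c] := PySem.Set.add_of_not_mem hc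
      simp only [this]
      rw [ih (v ++ [c]) (p ++ [c])]
      simp [List.append_assoc]

lemma pvPend_sub (cs : List Int) (v : List Int) :
    (pvPend v cs).length ≤ cs.length ∧ ∀ c ∈ pvPend v cs, c ∈ cs ∧ c ∉ v := by
  induction cs generalizing v with
  | nil => simp [pvPend]
  | cons c cs ih =>
    simp only [pvPend]
    by_cases hc : c ∈ v
    · rw [if_pos hc]
      obtain ⟨h1, h2⟩ := ih v
      refine ⟨by simpa using Nat.le_succ_of_le h1, ?_⟩
      intro x hx
      exact ⟨List.mem_cons_of_mem _ (h2 x hx).1, (h2 x hx).2⟩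
    · rw [if_neg hc]
      obtain ⟨h1, h2⟩ := ih (v ++ [c])
      constructor
      · simpa using h1
      · intro x hx
        rcases List.mem_cons.1 hx with rfl | hx'
        · exact ⟨List.mem_cons_self .., hc⟩
        · obtain ⟨ha, hb⟩ := h2 x hx'
          exact ⟨List.mem_cons_of_mem _ ha, fun h => hb (List.mem_append_left _ h)⟩

def pvMid (lookup : List (Int × List Int)) (visited : PySem.Set Int) (pending : List Int) :
    PySem.Set Int :=
  match pending with
  | [] => visited
  | node :: rest =>
    let st := (((PySem.Dict.mk lookup).get? node).getD []).foldl pvStep (visited, rest)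
    pvMid lookup st.1 st.2
termination_by pvMu lookup visited pending
decreasing_by
  rw [pvFoldEq]
  obtain ⟨hlen, hmem⟩ := pvPend_sub (((PySem.Dict.mk lookup).get? node).getD []) visited
  rcases hnew : pvPend visited (((PySem.Dict.mk lookup).get? node).getD []) with _ | ⟨c0, newrest⟩
  · simp [pvMu]
  · -- at least one genuinely new child was appended
    rw [hnew] at hlen hmem
    have hc0 := hmem c0 (List.mem_cons_self ..)
    rcases hget : (PySem.Dict.mk lookup).get? node with _ | cs
    · rw [hget] at hc0; simp at hc0
    · rw [hget] at hc0 hlen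
      simp only [Option.getD_some] at hc0 hlen
      have hmemL : (node, cs) ∈ lookup := pvGet?_mem _ _ _ hget
      have hstrict := pvCountP_strict (pvUniv lookup) visited
        (visited ++ (c0 :: newrest))
        (fun y hy => List.mem_append_left _ hy) c0
        (pvEntry_child_mem _ _ _ hmemL c0 hc0.1)
        (List.mem_append_right _ (List.mem_cons_self ..)) hc0.2
      have hS : cs.length ≤ pvChildSum lookup := pvEntry_len_le _ _ _ hmemL
      simp only [List.length_cons] at hlen
      simp only [pvMu, List.length_append, List.length_cons]
      have hmul := Nat.mul_le_mul_right (pvChildSum lookup + 1) hstrict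
      rw [Nat.succ_mul] at hmul
      omega

-- pvPend splits over append: the later part is filtered against v enlarged by the earlier part.
lemma pvPend_append (a b : List Int) : ∀ v : List Int,
    pvPend v (a ++ b) = pvPend v a ++ pvPend (v ++ pvPend v a) b := by
  induction a with
  | nil => intro v; simp [pvPend]
  | cons n a ih =>
    intro v
    simp only [List.cons_append, pvPend]
    by_cases hn : n ∈ v
    · rw [if_pos hn, if_pos hn, ih]
    · rw [if_neg hn, if_neg hn]
      rw [ih (v ++ [n])]
      simp [List.append_assoc]

-- Simulation of A by the intermediate: A's state (v, q) corresponds to (v ++ pvPend v q, pvPend v q).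
lemma pvMainA (lookup : List (Int × List Int)) :
    ∀ (v : PySem.Set Int) (q : List Int),
      pvBfsA lookup v q = pvMid lookup (v ++ pvPend v q) (pvPend v q) := by
  intro v q
  induction v, q using pvBfsA.induct lookup with
  | case1 v =>
    simp [pvBfsA, pvMid, pvPend]
  | case2 v node rest hv ih =>
    rw [pvBfsA]
    rw [dif_pos hv]
    rw [ih]
    conv_rhs => rw [pvPend]
    rw [if_pos hv]
  | case3 v node rest hv hcs ih =>
    -- node unvisited, falsy children (no entry or empty list): nothing enqueued
    rw [pvBfsA]
    rw [dif_neg hv, dif_pos hcs]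
    rw [ih]
    have hadd : PySem.Set.add v node = v ++ [node] := PySem.Set.add_of_not_mem hv
    conv_rhs => rw [pvPend]
    rw [if_neg hv]
    rw [pvMid]
    simp only [hcs, List.foldl_nil]
    rw [hadd]
    simp [List.append_assoc]
  | case4 v node rest hv hcs ih =>
    -- node unvisited, nonempty children list: A enqueues the children at the back
    rw [pvBfsA]
    rw [dif_neg hv, dif_neg hcs]
    rw [ih]
    have hadd : PySem.Set.add v node = v ++ [node] := PySem.Set.add_of_not_mem hv
    conv_rhs => rw [pvPend]
    rw [if_neg hv]
    rw [pvMid]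
    rw [pvFoldEq]
    rw [hadd, pvPend_append]
    simp [List.append_assoc]

-- Set.update appends exactly the pending (first-new) elements.
lemma pvUpdate_eq_append_pend (cs : List Int) : ∀ v : PySem.Set Int,
    PySem.Set.update v cs = v ++ pvPend v cs := by
  induction cs with
  | nil => intro v; simp [PySem.Set.update, pvPend]
  | cons c cs ih =>
    intro v
    simp only [PySem.Set.update, List.foldl_cons, pvPend] at *
    by_cases hc : c ∈ v
    · rw [if_pos hc]
      have : PySem.Set.add v c = v := by
        simp [PySem.Set.add, PySem.Set.contains, hc]
      rw [this, ih v]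
    · rw [if_neg hc]
      rw [PySem.Set.add_of_not_mem hc, ih (v ++ [c])]
      simp [List.append_assoc]

-- dedup-then-filter computes pvPend: generalized over the dedup accumulator w,
-- with u representing the union of v and w.
lemma pvDedupFilter_gen (v : List Int) : ∀ (cs w u : List Int),
    (∀ x : Int, x ∈ u ↔ x ∈ v ∨ x ∈ w) →
    (pvPend w cs).filter (fun c => !(PySem.Set.contains v c)) = pvPend u cs := by
  intro cs
  induction cs with
  | nil => intro w u _; simp [pvPend]
  | cons n rest ih =>
    intro w u hu
    simp only [pvPend]
    by_cases hnw : n ∈ w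
    · rw [if_pos hnw, if_pos ((hu n).2 (Or.inr hnw))]
      exact ih w u hu
    · rw [if_neg hnw]
      by_cases hnv : n ∈ v
      · rw [if_pos ((hu n).2 (Or.inl hnv))]
        have hb : (!(PySem.Set.contains v n)) = false := by
          simp [PySem.Set.contains, hnv]
        simp only [List.filter_cons, hb, Bool.false_eq_true, if_false]
        refine ih (w ++ [n]) u ?_
        intro x
        have hx := hu x
        simp only [List.mem_append, List.mem_singleton]
        constructor
        · intro h
          exact (hx.1 h).elim Or.inl (fun h' => Or.inr (Or.inl h'))
        · rintro (h | h | rfl)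
          · exact hx.2 (Or.inl h)
          · exact hx.2 (Or.inr h)
          · exact hx.2 (Or.inl hnv)
      · have hnu : n ∉ u := fun h => ((hu n).1 h).elim hnv hnw
        rw [if_neg hnu]
        have hb : (!(PySem.Set.contains v n)) = true := by
          simp [PySem.Set.contains, hnv]
        simp only [List.filter_cons, hb, if_true]
        refine congrArg (n :: ·) (ih (w ++ [n]) (u ++ [n]) ?_)
        intro x
        have hx := hu x
        simp only [List.mem_append, List.mem_singleton]
        constructor
        · rintro (h | rfl)
          · exact (hx.1 h).elim Or.inl (fun h' => Or.inr (Or.inl h'))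
          · exact Or.inr (Or.inr rfl)
        · rintro (h | h | rfl)
          · exact Or.inl (hx.2 (Or.inl h))
          · exact Or.inl (hx.2 (Or.inr h))
          · exact Or.inr rfl

lemma pvDedupFilter (v cs : List Int) :
    (PySem.List.dedup cs).filter (fun c => !(PySem.Set.contains v c)) = pvPend v cs := by
  have hded : PySem.List.dedup cs = pvPend ([] : List Int) cs := by
    rw [PySem.List.dedup_eq_ofList, PySem.Set.ofList_eq_foldl,
      show List.foldl PySem.Set.add ([] : List Int) cs = PySem.Set.update ([] : List Int) cs from rfl,
      pvUpdate_eq_append_pend]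
    simp
  rw [hded]
  exact pvDedupFilter_gen v cs [] v (by intro x; simp)

-- pvPend yields nodup elements disjoint from v …
lemma pvPend_nodup (cs : List Int) : ∀ v : List Int, (pvPend v cs).Nodup := by
  induction cs with
  | nil => intro v; simp [pvPend]
  | cons n rest ih =>
    intro v
    simp only [pvPend]
    by_cases hn : n ∈ v
    · rw [if_pos hn]; exact ih v
    · rw [if_neg hn]
      refine List.nodup_cons.2 ⟨?_, ih (v ++ [n])⟩
      intro hmem
      exact ((pvPend_sub rest (v ++ [n])).2 n hmem).2 (List.mem_append_right _ (by simp))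

-- … hence pvPend is the identity on its own output.
lemma pvPend_id : ∀ (l v : List Int), l.Nodup → (∀ x ∈ l, x ∉ v) → pvPend v l = l := by
  intro l
  induction l with
  | nil => intro v _ _; simp [pvPend]
  | cons n rest ih =>
    intro v hnd hdisj
    simp only [pvPend]
    rw [if_neg (hdisj n (List.mem_cons_self ..))]
    congr 1
    refine ih (v ++ [n]) (List.nodup_cons.1 hnd).2 ?_
    intro x hx hmem
    rcases List.mem_append.1 hmem with h | h
    · exact hdisj x (List.mem_cons_of_mem _ hx) h
    · simp at h; subst h; exact (List.nodup_cons.1 hnd).1 hx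

lemma pvMidLevels (lookup : List (Int × List Int)) : ∀ (q1 : List Int) (v : PySem.Set Int) (q2 : List Int),
    pvMid lookup v (q1 ++ q2)
      = pvMid lookup (v ++ pvPend v (q1.flatMap (fun n => ((PySem.Dict.mk lookup).get? n).getD [])))
          (q2 ++ pvPend v (q1.flatMap (fun n => ((PySem.Dict.mk lookup).get? n).getD []))) := by
  intro q1
  induction q1 with
  | nil => intro v q2; simp [pvPend]
  | cons n q1' ih =>
    intro v q2
    rw [List.cons_append, pvMid]
    rw [pvFoldEq]
    rw [List.flatMap_cons, pvPend_append]
    rw [show q1' ++ q2 ++ pvPend v (((PySem.Dict.mk lookup).get? n).getD [])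
        = q1' ++ (q2 ++ pvPend v (((PySem.Dict.mk lookup).get? n).getD [])) from (List.append_assoc ..)]
    rw [ih]
    simp [List.append_assoc]

-- The intermediate worklist equals B's level loop.
lemma pvMidLevelB (lookup : List (Int × List Int)) : ∀ (v : PySem.Set Int) (f : List Int),
    pvMid lookup v f = pvLevelB lookup v f := by
  intro v f
  induction v, f using pvLevelB.induct lookup with
  | case1 v =>
    rw [pvMid, pvLevelB]
    rfl
  | case2 v f hf cands next ih =>
    have hattach : List.flatMap (fun x : {x // x ∈ f} => ((PySem.Dict.mk lookup).get? x.1).getD []) f.attach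
        = f.flatMap (fun n => ((PySem.Dict.mk lookup).get? n).getD []) := by simp
    have hc : cands = f.flatMap (fun n => ((PySem.Dict.mk lookup).get? n).getD []) := hattach
    have hn : next = (PySem.List.dedup (f.flatMap (fun n => ((PySem.Dict.mk lookup).get? n).getD []))).filter
        (fun c => !(PySem.Set.contains v c)) := by
      rw [show (next : List Int) = (PySem.List.dedup cands).filter (fun c => !(PySem.Set.contains v c)) from rfl, hc]
    rw [hn] at ih
    rw [pvLevelB, dif_neg hf]
    simp only [hattach]
    rw [← ih]
    rw [pvDedupFilter v (f.flatMap (fun n => ((PySem.Dict.mk lookup).get? n).getD []))]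
    set P := pvPend v (f.flatMap (fun n => ((PySem.Dict.mk lookup).get? n).getD [])) with hP
    have hupd : PySem.Set.update v P = v ++ P := by
      rw [pvUpdate_eq_append_pend]
      congr 1
      exact pvPend_id P v (hP ▸ pvPend_nodup _ v)
        (fun x hx => ((pvPend_sub _ v).2 x (hP ▸ hx)).2)
    rw [hupd]
    have hlev := pvMidLevels lookup f v []
    rw [List.append_nil, List.nil_append] at hlev
    rw [hlev]

-- ===== VERDICT (by name: the statement is the Claim_ definition above) =====
theorem get_all_descendants_spec : Claim_equal_get_all_descendants := by
  intro lookup start_id _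
  unfold Spec_get_all_descendants get_all_descendants get_all_descendants_alt
  rw [pvMainA]
  have h : pvPend PySem.Set.empty [start_id] = [start_id] := by
    simp [pvPend, PySem.Set.empty]
  rw [h]
  rw [pvMidLevelB]
  rfl
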